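-- pv_equiv track=rewrite | github.com/greatzby/LLM3 | path_distribution_tracking.py | extract_path_from_tokens
-- ===== SOURCE A (Python) =====
-- def extract_path_from_tokens(token_ids):
--     """从token序列提取路径"""
--     path = []
--     # 跳过前3个token (source target source)
--     for i in range(3, len(token_ids)):
--         tid = token_ids[i]
--         if tid == 1:  # 换行符
--             break
--         if 2 <= tid <= 101:  # 节点token范围
--             path.append(tid - 2)  # 转换回节点id
--     return tuple(path)
-- ===== SOURCE B (Python) =====
-- def extract_path_from_tokens(token_ids):
--     """从token序列提取路径"""
--     # Reverse scan: seeing a newline token discards everything collected so far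
--     # (it all lies after the first newline), so no break/index search is needed.
--     rev = []
--     for t in reversed(token_ids[3:]):
--         if t == 1:
--             rev = []
--         elif 2 <= t <= 101:
--             rev.append(t - 2)
--     return tuple(reversed(rev))
-- ===== Notes on version B (the rewrite author's own statement) =====
-- stated objective: alternative
-- what changed: Replaces the forward index loop that breaks at the first newline with a reverse scan over the tail that resets its accumulator whenever it meets a newline token, so everything after the first newline is discarded without any break or index search; the collected reversed path is reversed once at the end.
import Mathlib
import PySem

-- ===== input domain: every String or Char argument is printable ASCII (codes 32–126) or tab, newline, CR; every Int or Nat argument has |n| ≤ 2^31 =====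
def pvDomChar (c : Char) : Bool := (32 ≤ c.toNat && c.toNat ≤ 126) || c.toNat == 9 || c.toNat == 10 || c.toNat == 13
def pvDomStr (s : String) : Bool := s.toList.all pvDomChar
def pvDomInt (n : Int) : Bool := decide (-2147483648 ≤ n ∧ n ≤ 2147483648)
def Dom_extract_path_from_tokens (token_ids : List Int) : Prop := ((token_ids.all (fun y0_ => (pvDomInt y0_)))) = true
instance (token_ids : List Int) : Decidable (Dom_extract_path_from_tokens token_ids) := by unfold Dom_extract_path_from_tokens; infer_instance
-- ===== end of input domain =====

-- B scans the tail in REVERSE, resetting its accumulator at each newline token (so no break or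
-- index search is needed), then reverses once at the end; same cost, a different traversal order.
-- ===== PORT A =====
-- loop body of A: iterate over the index range, break on 1, append node ids
def loopA (xs : List Int) : List Int → List Int → List Int
  | [], path => path
  | i :: is, path =>
    let tid := PySem.List.pyGetD xs i 0
    if tid = 1 then path
    else loopA xs is (if 2 ≤ tid ∧ tid ≤ 101 then path ++ [tid - 2] else path)

def extract_path_from_tokens (token_ids : List Int) : List Int :=
  loopA token_ids (PySem.List.pyRange 3 token_ids.length 1) []

-- ===== PORT B =====
def extract_path_from_tokens_alt (token_ids : List Int) : List Int :=
  ((PySem.List.slice token_ids (some 3) none).reverse.foldl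
    (fun rev t => if t = 1 then [] else if 2 ≤ t ∧ t ≤ 101 then rev ++ [t - 2] else rev)
    []).reverse

-- ===== PRECONDITION & SPEC =====
def Spec_extract_path_from_tokens (token_ids : List Int) (out : List Int) : Prop := out = extract_path_from_tokens_alt token_ids
instance (token_ids : List Int) (out : List Int) : Decidable (Spec_extract_path_from_tokens token_ids out) := by unfold Spec_extract_path_from_tokens; infer_instance

-- ===== CLAIM (what is proved, stated in full; the proofs are below) =====
def Claim_equal_extract_path_from_tokens : Prop := ∀ (token_ids : List Int), Dom_extract_path_from_tokens token_ids → Spec_extract_path_from_tokens token_ids (extract_path_from_tokens token_ids)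

-- ===== LEMMAS AND PROOFS =====

-- spec-side normal form of A's loop result on the tail
def go : List Int → List Int
  | [] => []
  | t :: ts => if t = 1 then [] else (if 2 ≤ t ∧ t ≤ 101 then [t - 2] else []) ++ go ts

lemma loopA_eq (n : Nat) : ∀ (xs : List Int) (a : Nat), xs.length - a = n →
    ∀ path, loopA xs (PySem.List.pyRange a xs.length 1) path = path ++ go (xs.drop a) := by
  induction n with
  | zero =>
    intro xs a h path
    have hle : xs.length ≤ a := by omega
    rw [PySem.List.pyRange_one_eq_nil (by exact_mod_cast hle)]
    simp [loopA, List.drop_eq_nil_of_le hle, go]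
  | succ n ih =>
    intro xs a h path
    have hlt : a < xs.length := by omega
    rw [PySem.List.pyRange_one_cons (by exact_mod_cast hlt)]
    have hget : PySem.List.pyGetD xs (a : Int) 0 = xs[a] := by
      simp [PySem.List.pyGetD_natCast, List.getD, List.getElem?_eq_getElem hlt]
    have hdrop : xs.drop a = xs[a] :: xs.drop (a + 1) := List.drop_eq_getElem_cons hlt
    have hcast : (a : Int) + 1 = ((a + 1 : Nat) : Int) := by push_cast; ring
    have hun : ∀ (is : List Int) path, loopA xs ((a : Int) :: is) path =
        if xs[a] = 1 then path
        else loopA xs is (if 2 ≤ xs[a] ∧ xs[a] ≤ 101 then path ++ [xs[a] - 2] else path) := by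
      intro is path; rw [loopA, hget]
    by_cases h1 : xs[a] = 1
    · rw [hun, if_pos h1, hdrop]
      rw [show go (xs[a] :: xs.drop (a + 1)) = [] from by rw [go]; simp [h1]]
      simp
    · rw [hun]
      simp only [h1, if_false, hcast]
      rw [ih xs (a + 1) (by omega), hdrop]
      rw [show go (xs[a] :: xs.drop (a + 1)) =
          (if 2 ≤ xs[a] ∧ xs[a] ≤ 101 then [xs[a] - 2] else []) ++ go (xs.drop (a + 1)) from by
        rw [go]; simp [h1]]
      by_cases h2 : 2 ≤ xs[a] ∧ xs[a] ≤ 101 <;> simp [h2, List.append_assoc]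

-- B's reverse-scan fold, in foldr form, builds (go l).reverse
lemma foldr_eq (l : List Int) :
    l.foldr (fun t rev => if t = 1 then [] else if 2 ≤ t ∧ t ≤ 101 then rev ++ [t - 2] else rev) []
      = (go l).reverse := by
  induction l with
  | nil => simp [go]
  | cons x ts ih =>
    by_cases hx : x = 1
    · simp [go, hx]
    · by_cases h2 : 2 ≤ x ∧ x ≤ 101 <;> simp [go, hx, h2, List.foldr_cons, ih]

-- ===== VERDICT (by name: the statement is the Claim_ definition above) =====
theorem extract_path_from_tokens_spec : Claim_equal_extract_path_from_tokens := by
  intro xs _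
  unfold Spec_extract_path_from_tokens extract_path_from_tokens extract_path_from_tokens_alt
  rw [show ((3 : Int)) = ((3 : Nat) : Int) from rfl]
  rw [loopA_eq (xs.length - 3) xs 3 rfl, PySem.List.slice_from_natCast,
      List.foldl_reverse]
  simp only [List.nil_append]
  rw [foldr_eq, List.reverse_reverse]
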